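-- pv_equiv track=rewrite | github.com/shatteringlass/aoc25 | day06.py | get_operations
-- ===== SOURCE A (Python) =====
-- def get_operations(lines):
--     operations = {}
--     for row in range(len(lines)):
--         for col, operand in enumerate(lines[row].split()):
--             operand = operand.strip()
--             if not operand:
--                 continue
--             operation = operations.setdefault(col, [])
--             operation.append(operand)
--     return operations
-- ===== SOURCE B (Python) =====
-- def get_operations(lines):
--     if not lines:
--         return {}
--     rows = [line.split() for line in lines]
--     max_cols = max(len(row) for row in rows)
--     return {col: [row[col] for row in rows if col < len(row)]
--             for col in range(max_cols)}
-- ===== Notes on version B (the rewrite author's own statement) =====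
-- stated objective: alternative
-- what changed: Replaces the row-major setdefault-accumulation into a dict with a column-major transpose: split all lines once, take the maximum row length, and build each column's list directly for col in range(max_cols).
import Mathlib
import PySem

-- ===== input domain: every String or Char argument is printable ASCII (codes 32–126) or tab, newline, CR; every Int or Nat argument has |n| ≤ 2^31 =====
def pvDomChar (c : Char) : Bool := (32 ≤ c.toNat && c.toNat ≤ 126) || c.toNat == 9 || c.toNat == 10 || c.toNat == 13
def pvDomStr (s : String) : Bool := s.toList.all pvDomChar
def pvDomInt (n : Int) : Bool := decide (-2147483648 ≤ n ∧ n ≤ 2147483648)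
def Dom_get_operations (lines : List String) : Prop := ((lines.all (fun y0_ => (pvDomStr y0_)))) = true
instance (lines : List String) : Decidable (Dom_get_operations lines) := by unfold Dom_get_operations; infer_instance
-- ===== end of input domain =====

-- B replaces A's row-major setdefault accumulation into a dict by a column-major transpose
-- (split every line once, take the max row length, build each column directly); same return value, proved equal.


-- ===== PORT A =====
def get_operations (lines : List String) : List (Int × List String) :=
  ((PySem.List.pyRange 0 (lines.length : Int) 1).foldl (fun ops row =>
      (PySem.List.enumerate (PySem.Str.split₀ (PySem.List.pyGetD lines row "")) 0).foldl
        (fun ops p =>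
          let operand := PySem.Str.strip p.2
          if operand == "" then ops
          else ops.modify p.1 [] (fun l => l ++ [operand]))
        ops)
    PySem.Dict.empty).items

-- ===== PORT B =====
def get_operations_alt (lines : List String) : List (Int × List String) :=
  if lines = [] then []
  else
    let rows := lines.map (fun line => PySem.Str.split₀ line)
    let maxCols : Int :=
      (PySem.List.max? (rows.map (fun r => (r.length : Int))) (fun y => y)).getD 0
    (PySem.List.pyRange 0 maxCols 1).map (fun col =>
      (col, (rows.filter (fun r => decide (col < (r.length : Int)))).map
              (fun r => PySem.List.pyGetD r col "")))

-- ===== PRECONDITION & SPEC =====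
def Spec_get_operations (lines : List String) (out : List (Int × List String)) : Prop := out = get_operations_alt lines
instance (lines : List String) (out : List (Int × List String)) : Decidable (Spec_get_operations lines out) := by unfold Spec_get_operations; infer_instance

-- ===== CLAIM (what is proved, stated in full; the proofs are below) =====
def Claim_equal_get_operations : Prop := ∀ (lines : List String), Dom_get_operations lines → Spec_get_operations lines (get_operations lines)

-- ===== LEMMAS AND PROOFS =====

lemma split0_go_tokens (s cur : List Char) (acc : List (List Char))
    (hacc : ∀ t ∈ acc, t ≠ [] ∧ ∀ c ∈ t, PySem.Chars.isspace c = false)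
    (hcur : ∀ c ∈ cur, PySem.Chars.isspace c = false) :
    ∀ t ∈ PySem.Chars.split₀.go s cur acc, t ≠ [] ∧ ∀ c ∈ t, PySem.Chars.isspace c = false := by
  induction s generalizing cur acc with
  | nil =>
    intro t ht
    simp only [PySem.Chars.split₀.go] at ht
    split at ht
    · exact hacc t (List.mem_reverse.mp ht)
    · rename_i hne
      rw [List.mem_reverse, List.mem_cons] at ht
      rcases ht with h | h
      · subst h
        refine ⟨?_, fun c hc => hcur c (List.mem_reverse.mp hc)⟩
        intro h0
        apply hne
        have : cur = [] := by simpa using congrArg List.reverse h0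
        simp [this]
      · exact hacc t h
  | cons c rest ih =>
    intro t ht
    simp only [PySem.Chars.split₀.go] at ht
    split at ht
    · rename_i hsp
      split at ht
      · exact ih [] acc hacc (by simp) t ht
      · rename_i hne
        refine ih [] (cur.reverse :: acc) ?_ (by simp) t ht
        intro u hu
        rw [List.mem_cons] at hu
        rcases hu with hu | hu
        · subst hu
          refine ⟨?_, fun d hd => hcur d (List.mem_reverse.mp hd)⟩
          intro h0
          apply hne
          have : cur = [] := by simpa using congrArg List.reverse h0
          simp [this]
        · exact hacc u hu
    · rename_i hsp
      refine ih (c :: cur) acc hacc ?_ t ht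
      intro d hd
      rw [List.mem_cons] at hd
      rcases hd with hd | hd
      · subst hd; simpa using hsp
      · exact hcur d hd

lemma split0_tokens (s : List Char) :
    ∀ t ∈ PySem.Chars.split₀ s, t ≠ [] ∧ ∀ c ∈ t, PySem.Chars.isspace c = false :=
  split0_go_tokens s [] [] (by simp) (by simp)

lemma strip_of_wsfree (t : List Char) (h : ∀ c ∈ t, PySem.Chars.isspace c = false) :
    PySem.Chars.strip t = t := by
  have h1 : PySem.Chars.lstrip t = t := by
    apply List.dropWhile_eq_self_iff.mpr
    cases t with
    | nil => simp
    | cons a l => simpa using h a (by simp)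
  have h2 : PySem.Chars.rstrip t = t := by
    simp only [PySem.Chars.rstrip]
    rw [List.dropWhile_eq_self_iff.mpr]
    · simp
    · cases ht : t.reverse with
      | nil => simp
      | cons a l =>
        intro hl
        have ha : a ∈ t := by
          have : a ∈ t.reverse := by simp [ht]
          simpa using this
        simp [h a ha]
  rw [PySem.Chars.strip, h1, h2]

lemma str_split0_tokens (s : String) :
    ∀ w ∈ PySem.Str.split₀ s, PySem.Str.strip w = w ∧ (w == "") = false := by
  intro w hw
  simp only [PySem.Str.split₀, List.mem_map] at hw
  obtain ⟨t, ht, rfl⟩ := hw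
  obtain ⟨hne, hws⟩ := split0_tokens s.toList t ht
  have htl : (String.ofList t).toList = t := by simp
  constructor
  · apply String.toList_inj.mp
    rw [PySem.Str.toList_strip, htl, strip_of_wsfree t hws]
  · rw [beq_eq_false_iff_ne]
    intro h0
    apply hne
    simpa using congrArg String.toList h0


-- small generic loop-shape lemmas
lemma foldl_flatMap_fold {α β γ : Type} (g : α → List β) (f : γ → β → γ) :
    ∀ (l : List α) (init : γ),
      l.foldl (fun acc x => (g x).foldl f acc) init = (l.flatMap g).foldl f init := by
  intro l
  induction l with
  | nil => intro init; simp
  | cons x t ih => intro init; simp [List.foldl_append, ih]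

lemma set_update_range (m a : Int) (hm : 0 ≤ m) (ha : 0 ≤ a) :
    PySem.Set.update (PySem.List.pyRange 0 m 1) (PySem.List.pyRange 0 a 1)
      = PySem.List.pyRange 0 (max m a) 1 := by
  rw [PySem.Set.update_eq_append_filter,
      PySem.Set.ofList_eq_self_of_nodup _ (PySem.List.nodup_pyRange_one 0 a)]
  rcases le_or_gt a m with h | h
  · have h1 : (PySem.List.pyRange 0 a 1).filter
        (fun y => !(PySem.Set.contains (PySem.List.pyRange 0 m 1) y)) = [] := by
      apply List.filter_eq_nil_iff.mpr
      intro y hy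
      rw [PySem.List.mem_pyRange_one] at hy
      simp
      omega
    rw [h1, List.append_nil, max_eq_left h]
  · have hsplit : PySem.List.pyRange 0 a 1
        = PySem.List.pyRange 0 m 1 ++ PySem.List.pyRange m a 1 :=
      PySem.List.pyRange_one_append 0 m a hm (le_of_lt h)
    rw [hsplit, List.filter_append]
    have h1 : (PySem.List.pyRange 0 m 1).filter
        (fun y => !(PySem.Set.contains (PySem.List.pyRange 0 m 1) y)) = [] := by
      apply List.filter_eq_nil_iff.mpr
      intro y hy
      rw [PySem.List.mem_pyRange_one] at hy
      simp
      omega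
    have h2 : (PySem.List.pyRange m a 1).filter
        (fun y => !(PySem.Set.contains (PySem.List.pyRange 0 m 1) y)) =
        PySem.List.pyRange m a 1 := by
      apply List.filter_eq_self.mpr
      intro y hy
      rw [PySem.List.mem_pyRange_one] at hy
      simp
      omega
    rw [h1, h2, List.nil_append, ← hsplit, max_eq_right (le_of_lt h)]

lemma update_flatMap {α : Type} (g : α → List Int) :
    ∀ (l : List α) (s : PySem.Set Int),
      PySem.Set.update s (l.flatMap g) = l.foldl (fun s x => PySem.Set.update s (g x)) s := by
  intro l
  induction l with
  | nil => intro s; simp [PySem.Set.update]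
  | cons x t ih => intro s; simp [PySem.Set.update_append, ih]

lemma foldl_update_ranges {α : Type} (len : α → Int) (hlen : ∀ a, 0 ≤ len a) :
    ∀ (l : List α) (m : Int), 0 ≤ m →
      l.foldl (fun s a => PySem.Set.update s (PySem.List.pyRange 0 (len a) 1))
        (PySem.List.pyRange 0 m 1)
      = PySem.List.pyRange 0 (l.foldl (fun m a => max m (len a)) m) 1 := by
  intro l
  induction l with
  | nil => intro m hm; simp
  | cons x t ih =>
    intro m hm
    simp only [List.foldl_cons]
    rw [set_update_range m (len x) hm (hlen x), ih _ (le_trans hm (le_max_left _ _))]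


-- Step A1: A's dict as a single fold over all (col, token) pairs
lemma A_as_flat (lines : List String) :
    get_operations lines =
      (((lines.map (fun line => PySem.Str.split₀ line)).flatMap
          (fun r => PySem.List.enumerate r 0)).foldl
        (fun d p => d.modify p.1 [] (fun l => l ++ [p.2])) PySem.Dict.empty).items := by
  unfold get_operations
  have key := PySem.List.foldl_pyRange_zero_pyGetD' lines ""
      (fun (ops : PySem.Dict Int (List String)) (line : String) =>
        (PySem.List.enumerate (PySem.Str.split₀ line) 0).foldl
          (fun ops p =>
            let operand := PySem.Str.strip p.2
            if operand == "" then ops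
            else ops.modify p.1 [] (fun l => l ++ [operand])) ops)
      PySem.Dict.empty
  simp only at key
  rw [key]
  rw [← List.foldl_map (f := fun line => PySem.Str.split₀ line)
      (g := fun (ops : PySem.Dict Int (List String)) (r : List String) =>
        (PySem.List.enumerate r 0).foldl
          (fun ops p =>
            if (PySem.Str.strip p.2 == "") then ops
            else ops.modify p.1 [] (fun l => l ++ [PySem.Str.strip p.2])) ops)]
  rw [← foldl_flatMap_fold (g := fun r => PySem.List.enumerate r 0)
      (f := fun (d : PySem.Dict Int (List String)) (p : Int × String) =>
        d.modify p.1 [] (fun l => l ++ [p.2]))]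
  congr 1
  apply PySem.List.foldl_congr_mem
  intro acc r hr
  apply PySem.List.foldl_congr_mem
  intro acc2 p hp
  obtain ⟨line, _, rfl⟩ := List.mem_map.mp hr
  have hp2 : p.2 ∈ PySem.Str.split₀ line := by
    obtain ⟨k, hk, rfl⟩ := (PySem.List.mem_enumerate_iff _ _ _).mp hp
    exact List.mem_of_getElem rfl
  obtain ⟨hstrip, hne⟩ := str_split0_tokens line p.2 hp2
  simp only [hstrip, hne]
  simp

-- per-row column extraction
lemma row_filter_col (r : List String) (c : Int) (hc : 0 ≤ c) :
    ((PySem.List.enumerate r 0).filter (fun p => p.1 == c)).map (fun p => p.2)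
      = if c < (r.length : Int) then [PySem.List.pyGetD r c ""] else [] := by
  rw [PySem.List.enumerate_eq_map_pyRange r ""]
  rw [List.filter_map, List.map_map]
  have hfil : ((PySem.List.pyRange 0 (PySem.List.len r) 1).filter
      ((fun p => p.1 == c) ∘ (fun j => (j, PySem.List.pyGetD r j "")))) =
      if c < (r.length : Int) then [c] else [] := by
    have : ((fun (p : Int × String) => p.1 == c) ∘ (fun j => (j, PySem.List.pyGetD r j ""))) =
        (fun j => j == c) := rfl
    rw [this, List.filter_beq]
    by_cases h : c < (r.length : Int)
    · have hmem : c ∈ PySem.List.pyRange 0 (PySem.List.len r) 1 := by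
        rw [PySem.List.mem_pyRange_one]
        constructor
        · exact hc
        · simpa [PySem.List.len] using h
      rw [List.count_eq_one_of_mem (PySem.List.nodup_pyRange_one _ _) hmem]
      simp [h]
    · have hmem : c ∉ PySem.List.pyRange 0 (PySem.List.len r) 1 := by
        rw [PySem.List.mem_pyRange_one]
        intro hctr
        exact h (by simpa [PySem.List.len] using hctr.2)
      rw [List.count_eq_zero_of_not_mem hmem]
      simp [h]
  rw [hfil]
  by_cases h : c < (r.length : Int) <;> simp [h]

-- column contents over all rows
lemma values_flat (rows : List (List String)) (c : Int) (hc : 0 ≤ c) :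
    ((rows.flatMap (fun r => PySem.List.enumerate r 0)).filter
        (fun p => p.1 == c)).map (fun p => p.2)
      = (rows.filter (fun r => decide (c < (r.length : Int)))).map
          (fun r => PySem.List.pyGetD r c "") := by
  induction rows with
  | nil => simp
  | cons r t ih =>
    simp only [List.flatMap_cons, List.filter_append, List.map_append, ih]
    rw [row_filter_col r c hc]
    by_cases h : c < (r.length : Int) <;> simp [h]

-- keys of the flat fold
lemma keys_flat (rows : List (List String)) :
    PySem.Set.ofList ((rows.flatMap (fun r => PySem.List.enumerate r 0)).map (fun p => p.1))
      = PySem.List.pyRange 0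
          (rows.foldl (fun m r => max m ((r.length : Int))) 0) 1 := by
  have h1 : ((rows.flatMap (fun r => PySem.List.enumerate r 0)).map (fun p => p.1))
      = rows.flatMap (fun r => PySem.List.pyRange 0 ((r.length : Int)) 1) := by
    rw [List.map_flatMap]
    simp only [PySem.List.map_fst_enumerate, zero_add]
  rw [h1, ← PySem.Set.update_nil_left, update_flatMap]
  have key := foldl_update_ranges (fun r : List String => (r.length : Int))
      (fun a => Int.natCast_nonneg _) rows 0 le_rfl
  rw [PySem.List.pyRange_one_eq_nil (le_refl (0 : Int))] at key
  exact key

theorem main_equiv (lines : List String) : get_operations lines = get_operations_alt lines := by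
  cases lines with
  | nil => decide
  | cons l0 rest =>
    rw [A_as_flat]
    have hnil : (l0 :: rest) ≠ ([] : List String) := by simp
    unfold get_operations_alt
    rw [if_neg hnil]
    simp only []
    -- abbreviations (plain lets in the goal are gone; we work with explicit terms)
    have hkeys :
        ((((l0 :: rest).map (fun line => PySem.Str.split₀ line)).flatMap
            (fun r => PySem.List.enumerate r 0)).foldl
          (fun d p => d.modify p.1 [] (fun l => l ++ [p.2])) PySem.Dict.empty).keys
        = PySem.List.pyRange 0
            (((l0 :: rest).map (fun line => PySem.Str.split₀ line)).foldl
              (fun m r => max m ((r.length : Int))) 0) 1 := by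
      have k1 := PySem.Dict.keys_foldl_modify_key
        ((((l0 :: rest).map (fun line => PySem.Str.split₀ line)).flatMap
            (fun r => PySem.List.enumerate r 0)))
        (fun p => p.1) ([] : List String) (fun d p => fun l => l ++ [p.2]) PySem.Dict.empty
      simp only at k1
      rw [k1]
      rw [PySem.Dict.keys_empty, PySem.Set.update_nil_left]
      exact keys_flat _
    have hnodup :
        ((((l0 :: rest).map (fun line => PySem.Str.split₀ line)).flatMap
            (fun r => PySem.List.enumerate r 0)).foldl
          (fun d p => d.modify p.1 [] (fun l => l ++ [p.2])) PySem.Dict.empty).keys.Nodup := by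
      have k2 := PySem.Dict.nodup_keys_foldl_modify_key
        ((((l0 :: rest).map (fun line => PySem.Str.split₀ line)).flatMap
            (fun r => PySem.List.enumerate r 0)))
        (fun p => p.1) ([] : List String) (fun d p => fun l => l ++ [p.2]) PySem.Dict.empty
        (by rw [PySem.Dict.keys_empty]; exact List.nodup_nil)
      simpa using k2
    rw [PySem.Dict.items_eq_map_keys _ hnodup ([] : List String), hkeys]
    -- the two max computations agree
    have hmax :
        (((l0 :: rest).map (fun line => PySem.Str.split₀ line)).foldl
            (fun m r => max m ((r.length : Int))) 0)
        = ((PySem.List.max? (((l0 :: rest).map (fun line => PySem.Str.split₀ line)).map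
              (fun r => (r.length : Int))) (fun y => y)).getD 0) := by
      rw [List.map_cons, List.map_cons, PySem.List.max?_id_cons, Option.getD_some]
      rw [List.foldl_cons, ← List.foldl_map (f := fun r : List String => (r.length : Int)) (g := max)]
      congr 1

    rw [← hmax]
    apply List.map_congr_left
    intro c hc
    have hc0 : 0 ≤ c := (PySem.List.mem_pyRange_one.mp hc).1
    have hgetD := PySem.Dict.getD_foldl_modify_append
      ((((l0 :: rest).map (fun line => PySem.Str.split₀ line)).flatMap
          (fun r => PySem.List.enumerate r 0)))
      PySem.Dict.empty c
    rw [PySem.Dict.getD_empty, List.nil_append] at hgetD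
    rw [hgetD, values_flat _ c hc0]

-- ===== VERDICT (by name: the statement is the Claim_ definition above) =====
theorem get_operations_spec : Claim_equal_get_operations := by
  intro lines _
  unfold Spec_get_operations
  exact main_equiv lines
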